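-- pv_equiv track=rewrite | github.com/INF1007-2022A/chapitre-03-2-MaelPixel | exercice.py | format_base
-- ===== SOURCE A (Python) =====
-- def format_base(value, base, digit_letters):
-- 	# Formater un nombre dans une base donné en utilisant les lettres fournies pour les chiffres<
-- 	# `digits_letters[0]` Nous donne la lettre pour le chiffre 0, ainsi de suite.
-- 	result = ""
-- 	abs_value = abs(value)
-- 	while abs_value != 0:
-- 		index=abs_value % base
-- 		result+=digit_letters[index]
-- 		abs_value//=base
--
-- 	if value < 0:
-- 		# TODO: Ne pas oublier d'ajouter '-' devant pour les nombres négatifs.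
-- 		result+='-'
-- 	return result[::-1]
-- ===== SOURCE B (Python) =====
-- def format_base(value, base, digit_letters):
--     # Recursive formulation: build the string most-significant-first, no reversal.
--     if value < 0:
--         return '-' + format_base(-value, base, digit_letters)
--     if value == 0:
--         return ''
--     return format_base(value // base, base, digit_letters) + digit_letters[value % base]
-- ===== Notes on version B (the rewrite author's own statement) =====
-- stated objective: simpler
-- what changed: Replaced the while loop that accumulates digits least-significant-first and then reverses the string with a direct recursion over value//base that builds the string most-significant-first, eliminating the accumulator and the reversal.
-- outside the precondition, e.g. on format_base(5, -2, 'ab'): A returns 'bbbb', B raises RecursionError; on format_base(3, 16, '0123456789'): A returns '3', B returns '3'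
import Mathlib
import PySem

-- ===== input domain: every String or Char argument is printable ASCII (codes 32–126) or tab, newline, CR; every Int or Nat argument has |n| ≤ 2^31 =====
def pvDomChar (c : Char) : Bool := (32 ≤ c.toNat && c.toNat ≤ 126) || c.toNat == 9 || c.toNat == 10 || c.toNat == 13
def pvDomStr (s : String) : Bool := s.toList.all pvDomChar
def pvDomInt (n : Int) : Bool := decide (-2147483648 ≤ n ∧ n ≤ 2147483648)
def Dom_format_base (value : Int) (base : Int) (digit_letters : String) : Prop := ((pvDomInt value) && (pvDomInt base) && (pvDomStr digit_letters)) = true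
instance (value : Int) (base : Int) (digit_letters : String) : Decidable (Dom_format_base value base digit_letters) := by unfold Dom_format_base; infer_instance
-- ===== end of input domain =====

-- B replaces A's reverse-at-the-end digit loop by a direct most-significant-first recursion (objective: simpler).

-- ===== PORT A =====
-- A's while loop; string state ported over List Char (exact: += of one char, [::-1] is list reverse).
-- fuel = value.natAbs + 1 bounds the iteration count on Pre_ (abs_value strictly decreases when base ≥ 2);
-- on a Python IndexError (pyGet? = none) the port stops (excluded by Pre_).
def loopA (fuel : Nat) (absv : Int) (base : Int) (dl : List Char) (result : List Char) : List Char :=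
  match fuel with
  | 0 => result
  | f+1 =>
    if absv ≠ 0 then
      match PySem.List.pyGet? dl (PySem.Int.mod absv base) with
      | some c => loopA f (PySem.Int.floordiv absv base) base dl (result ++ [c])
      | none => result
    else result

def format_base (value : Int) (base : Int) (digit_letters : String) : String :=
  let r := loopA (value.natAbs + 1) |value| base digit_letters.toList []
  let r := if value < 0 then r ++ ['-'] else r
  String.ofList r.reverse

-- ===== PORT B =====
-- B's recursion on value // base; same fuel bound makes it total (B recurses at most natAbs times on Pre_).
def altGo (fuel : Nat) (v : Int) (base : Int) (dl : List Char) : List Char :=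
  match fuel with
  | 0 => []
  | f+1 =>
    if v = 0 then []
    else
      altGo f (PySem.Int.floordiv v base) base dl ++
        (match PySem.List.pyGet? dl (PySem.Int.mod v base) with
         | some c => [c]
         | none => [])

def format_base_alt (value : Int) (base : Int) (digit_letters : String) : String :=
  if value < 0 then String.ofList ('-' :: altGo (value.natAbs + 1) (-value) base digit_letters.toList)
  else String.ofList (altGo (value.natAbs + 1) value base digit_letters.toList)

-- ===== PRECONDITION & SPEC =====
-- Pre_ is the task's natural contract: base ≥ 2 and a digit letter for every digit of the base.
-- (value = 0 is admitted for every base: both programs return "" at once). It excludes base < 2 (A raises ZeroDivisionError at base 0, loops forever at base 1, and for negative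
-- bases returns values produced by accidental negative-index wraparound) and base > len(digit_letters)
-- (A raises IndexError whenever some digit of |value| has no letter; for values whose digits all have
-- letters A still returns, and B returns the same string there).
def Pre_format_base (value : Int) (base : Int) (digit_letters : String) : Prop :=
  value = 0 ∨ (2 ≤ base ∧ base ≤ (digit_letters.toList.length : Int))
instance (value : Int) (base : Int) (digit_letters : String) : Decidable (Pre_format_base value base digit_letters) := by unfold Pre_format_base; infer_instance
def pvWitness_format_base : Int × Int × String := (-10, 2, "01")

def Spec_format_base (value : Int) (base : Int) (digit_letters : String) (out : String) : Prop := out = format_base_alt value base digit_letters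
instance (value : Int) (base : Int) (digit_letters : String) (out : String) : Decidable (Spec_format_base value base digit_letters out) := by unfold Spec_format_base; infer_instance

-- ===== CLAIM (what is proved, stated in full; the proofs are below) =====
def Claim_equal_format_base : Prop := ∀ (value : Int) (base : Int) (digit_letters : String), Dom_format_base value base digit_letters → Pre_format_base value base digit_letters → Spec_format_base value base digit_letters (format_base value base digit_letters)

-- ===== LEMMAS AND PROOFS =====

-- A's loop result equals B's recursion, reversed, appended to the accumulator.
theorem loopA_eq_altGo (fuel : Nat) (absv base : Int) (dl : List Char) (result : List Char)
    (h0 : 0 ≤ absv) (hb : 2 ≤ base) (hlen : base ≤ (dl.length : Int)) :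
    loopA fuel absv base dl result = result ++ (altGo fuel absv base dl).reverse := by
  induction fuel generalizing absv result with
  | zero => simp [loopA, altGo]
  | succ f ih =>
    by_cases hz : absv = 0
    · simp [loopA, altGo, hz]
    · have hm0 : 0 ≤ PySem.Int.mod absv base := PySem.Int.mod_nonneg absv (by omega)
      have hmlt : PySem.Int.mod absv base < base := PySem.Int.mod_lt absv (by omega)
      have hidx : (PySem.Int.mod absv base).toNat < dl.length := by omega
      obtain ⟨c, hget⟩ : ∃ c, PySem.List.pyGet? dl (PySem.Int.mod absv base) = some c := by
        have hcast : PySem.Int.mod absv base = ((PySem.Int.mod absv base).toNat : Int) := by omega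
        refine ⟨dl[(PySem.Int.mod absv base).toNat], ?_⟩
        conv_lhs => rw [hcast]
        rw [PySem.List.pyGet?_natCast]
        exact List.getElem?_eq_getElem hidx
      have hq0 : 0 ≤ PySem.Int.floordiv absv base := by
        rw [PySem.Int.floordiv_eq_ediv_of_pos (by omega)]
        exact Int.ediv_nonneg h0 (by omega)
      simp only [loopA, altGo, hz, hget, ne_eq, not_false_iff, if_true]
      rw [ih _ _ hq0]
      simp

theorem format_base_spec : Claim_equal_format_base := by
  intro value base dl _ hpre
  rcases hpre with hz | ⟨hb, hlen⟩
  · subst hz; rfl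
  unfold Spec_format_base format_base format_base_alt
  by_cases hneg : value < 0
  · have habs : |value| = -value := abs_of_neg hneg
    rw [habs, if_pos hneg,
      loopA_eq_altGo _ _ _ _ _ (by omega) hb hlen]
    simp [hneg]
  · have habs : |value| = value := abs_of_nonneg (by omega)
    rw [habs, if_neg hneg,
      loopA_eq_altGo _ _ _ _ _ (by omega) hb hlen]
    simp [hneg]
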